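-- pv_equiv track=rewrite | github.com/mjukiewicz/Luna | sekwenty.py | first_translation
-- ===== SOURCE A (Python) =====
-- def first_translation(dic, formula):
--     for i in range(len(formula)):
--         for j in range(len(dic)):
--             if formula[i]==dic[j][1]:
--                 formula[i]=dic[j][0]
--                 del dic[j]
--                 break
--     return formula
-- ===== SOURCE B (Python) =====
-- def first_translation(dic, formula):
--     # One pass over dic builds value -> queue of keys (in dic order); one pass
--     # over formula consumes the earliest remaining key per matching value.
--     # Note: mutates formula in place like the original, but does not mutate dic.
--     queues = {}
--     for key, val in dic:
--         queues.setdefault(val, []).append(key)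
--     for i in range(len(formula)):
--         q = queues.get(formula[i])
--         if q:
--             formula[i] = q.pop(0)
--     return formula
-- ===== Notes on version B (the rewrite author's own statement) =====
-- stated objective: faster
-- what changed: Replaces the per-element linear scan (with deletion) over dic by a value->queue-of-keys dict built once, so each formula element pops its earliest remaining key in O(1) expected time; equivalence is about the return value (A also mutates dic, B does not).
import Mathlib
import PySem

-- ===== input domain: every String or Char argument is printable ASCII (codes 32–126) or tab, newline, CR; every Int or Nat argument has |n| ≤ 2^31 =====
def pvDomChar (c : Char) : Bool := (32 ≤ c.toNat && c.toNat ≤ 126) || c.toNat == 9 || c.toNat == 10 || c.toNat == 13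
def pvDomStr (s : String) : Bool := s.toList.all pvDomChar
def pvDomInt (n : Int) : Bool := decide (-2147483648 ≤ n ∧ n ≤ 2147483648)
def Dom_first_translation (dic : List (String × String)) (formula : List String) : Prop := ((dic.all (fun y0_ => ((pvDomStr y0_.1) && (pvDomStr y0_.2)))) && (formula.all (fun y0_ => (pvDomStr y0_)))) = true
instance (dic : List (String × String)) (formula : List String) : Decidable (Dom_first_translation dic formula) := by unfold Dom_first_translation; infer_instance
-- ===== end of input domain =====

-- ===== PORT A =====
-- B replaces A's per-element scan of dic by a value->queue dict built once (faster);
-- return-value equivalence only: A mutates dic and formula in place, B only formula.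
-- inner loop of A: first j with formula[i] == dic[j][1]; returns (dic[j][0], dic with j deleted)
def ftInner (dic : List (String × String)) (x : String) : Option (String × List (String × String)) :=
  match dic with
  | [] => none
  | (a, b) :: t =>
    if x == b then some (a, t)
    else
      match ftInner t x with
      | some (k, t') => some (k, (a, b) :: t')
      | none => none

def first_translation (dic : List (String × String)) (formula : List String) : List String :=
  match formula with
  | [] => []
  | x :: rest =>
    match ftInner dic x with
    | some (k, dic') => k :: first_translation dic' rest
    | none => x :: first_translation dic rest

-- ===== PORT B =====
def ftStep (st : PySem.Dict String (List String) × List String) (x : String) :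
    PySem.Dict String (List String) × List String :=
  match st.1.get? x with
  | some (k :: rest) => (st.1.insert x rest, st.2 ++ [k])
  | _ => (st.1, st.2 ++ [x])

def first_translation_alt (dic : List (String × String)) (formula : List String) : List String :=
  let queues := dic.foldl (fun d kv => d.modify kv.2 [] (fun l => l ++ [kv.1])) PySem.Dict.empty
  (formula.foldl ftStep (queues, [])).2

-- ===== PRECONDITION & SPEC =====
def Spec_first_translation (dic : List (String × String)) (formula : List String) (out : List String) : Prop := out = first_translation_alt dic formula
instance (dic : List (String × String)) (formula : List String) (out : List String) : Decidable (Spec_first_translation dic formula out) := by unfold Spec_first_translation; infer_instance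

-- ===== CLAIM (what is proved, stated in full; the proofs are below) =====
def Claim_equal_first_translation : Prop := ∀ (dic : List (String × String)) (formula : List String), Dom_first_translation dic formula → Spec_first_translation dic formula (first_translation dic formula)

-- ===== LEMMAS AND PROOFS =====
-- keys of dic whose value is x, in order
def keysOf (dic : List (String × String)) (x : String) : List String :=
  (dic.filter (fun p => p.2 == x)).map Prod.fst

theorem keysOf_nil (x : String) : keysOf [] x = [] := rfl

theorem keysOf_cons (a b x : String) (t : List (String × String)) :
    keysOf ((a, b) :: t) x = if b == x then a :: keysOf t x else keysOf t x := by
  by_cases h : b = x <;> simp [keysOf, h]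

theorem ftInner_none (dic : List (String × String)) (x : String)
    (h : ftInner dic x = none) : keysOf dic x = [] := by
  induction dic with
  | nil => rfl
  | cons p t ih =>
    obtain ⟨a, b⟩ := p
    by_cases hxb : x = b
    · simp [ftInner, hxb] at h
    · rw [keysOf_cons, if_neg (by simp only [beq_iff_eq]; exact fun e => hxb e.symm)]
      cases hft : ftInner t x with
      | none => exact ih hft
      | some p => obtain ⟨k, t'⟩ := p; simp [ftInner, hxb, hft] at h

theorem ftInner_some (dic : List (String × String)) (x k : String)
    (d' : List (String × String)) (h : ftInner dic x = some (k, d')) :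
    keysOf dic x = k :: keysOf d' x ∧ ∀ y, y ≠ x → keysOf d' y = keysOf dic y := by
  induction dic generalizing k d' with
  | nil => simp [ftInner] at h
  | cons p t ih =>
    obtain ⟨a, b⟩ := p
    by_cases hxb : x = b
    · simp only [ftInner, hxb, beq_self_eq_true, if_true, Option.some.injEq, Prod.mk.injEq] at h
      obtain ⟨hk, hd⟩ := h
      subst hk; subst hd; subst hxb
      constructor
      · rw [keysOf_cons, if_pos (by simp)]
      · intro y hy
        rw [keysOf_cons, if_neg (by simp only [beq_iff_eq]; exact fun e => hy e.symm)]
    · cases hft : ftInner t x with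
      | none => simp [ftInner, hxb, hft] at h
      | some p =>
        obtain ⟨k0, t'⟩ := p
        have hrec := ih k0 t' hft
        simp [ftInner, hxb, hft] at h
        obtain ⟨hk, hd⟩ := h
        subst hk; subst hd
        have hbx : ((b == x) = true) → False := by
          simp only [beq_iff_eq]; exact fun e => hxb e.symm
        constructor
        · rw [keysOf_cons, if_neg hbx, keysOf_cons, if_neg hbx, hrec.1]
        · intro y hy
          rw [keysOf_cons, keysOf_cons, hrec.2 y hy]

theorem build_getD (dic : List (String × String))
    (d : PySem.Dict String (List String)) (x : String) :
    (dic.foldl (fun d kv => d.modify kv.2 [] (fun l => l ++ [kv.1])) d).getD x []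
      = d.getD x [] ++ keysOf dic x := by
  induction dic generalizing d with
  | nil => simp [keysOf_nil]
  | cons p t ih =>
    obtain ⟨a, b⟩ := p
    rw [List.foldl_cons, ih, PySem.Dict.getD_modify, keysOf_cons]
    by_cases hbx : b = x
    · subst hbx; simp
    · rw [if_neg (fun e => hbx e.symm),
        if_neg (by simp only [beq_iff_eq]; exact hbx)]

theorem main_loop (formula : List String) (dic : List (String × String))
    (q : PySem.Dict String (List String)) (acc : List String)
    (hinv : ∀ x, q.getD x [] = keysOf dic x) :
    (formula.foldl ftStep (q, acc)).2 = acc ++ first_translation dic formula := by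
  induction formula generalizing dic q acc with
  | nil => simp [first_translation]
  | cons x rest ih =>
    rw [List.foldl_cons]
    have hx := hinv x
    cases hq : q.get? x with
    | none =>
      have hk : keysOf dic x = [] := by
        rw [← hx, PySem.Dict.getD_eq_get?_getD, hq]; rfl
      have hi : ftInner dic x = none := by
        cases hi : ftInner dic x with
        | none => rfl
        | some p =>
          obtain ⟨k, d'⟩ := p
          have := (ftInner_some dic x k d' hi).1
          rw [hk] at this; exact absurd this (by simp)
      show (rest.foldl ftStep (ftStep (q, acc) x)).2 = _
      rw [show ftStep (q, acc) x = (q, acc ++ [x]) by simp [ftStep, hq]]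
      rw [ih dic q (acc ++ [x]) hinv]
      simp [first_translation, hi]
    | some l =>
      cases l with
      | nil =>
        have hk : keysOf dic x = [] := by
          rw [← hx, PySem.Dict.getD_eq_get?_getD, hq]; rfl
        have hi : ftInner dic x = none := by
          cases hi : ftInner dic x with
          | none => rfl
          | some p =>
            obtain ⟨k, d'⟩ := p
            have := (ftInner_some dic x k d' hi).1
            rw [hk] at this; exact absurd this (by simp)
        show (rest.foldl ftStep (ftStep (q, acc) x)).2 = _
        rw [show ftStep (q, acc) x = (q, acc ++ [x]) by simp [ftStep, hq]]
        rw [ih dic q (acc ++ [x]) hinv]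
        simp [first_translation, hi]
      | cons k ks =>
        have hk : keysOf dic x = k :: ks := by
          rw [← hx, PySem.Dict.getD_eq_get?_getD, hq]; rfl
        cases hi : ftInner dic x with
        | none =>
          have := ftInner_none dic x hi
          rw [hk] at this; exact absurd this (by simp)
        | some p =>
          obtain ⟨k', d'⟩ := p
          obtain ⟨h1, h2⟩ := ftInner_some dic x k' d' hi
          rw [hk] at h1
          have hkk : k' = k := by injection h1 with he hte; exact he.symm
          have hks : keysOf d' x = ks := by injection h1 with he hte; exact hte.symm
          show (rest.foldl ftStep (ftStep (q, acc) x)).2 = _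
          rw [show ftStep (q, acc) x = (q.insert x ks, acc ++ [k]) by simp [ftStep, hq]]
          rw [ih d' (q.insert x ks) (acc ++ [k]) (by
            intro y
            rw [PySem.Dict.getD_insert]
            by_cases hy : y = x
            · simp [hy, hks]
            · simp [hy, hinv y, h2 y hy])]
          simp [first_translation, hi, hkk]

-- ===== VERDICT (by name: the statement is the Claim_ definition above) =====
theorem first_translation_spec : Claim_equal_first_translation := by
  intro dic formula _
  unfold Spec_first_translation first_translation_alt
  rw [main_loop formula dic _ [] (fun x => by
    rw [build_getD]; simp [PySem.Dict.empty, PySem.Dict.getD, PySem.Dict.get?])]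
  simp
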